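-- pv_equiv track=rewrite | github.com/bbnam/Sentiment_Analysis | Naive Bayes TFIDF.py | count_all_word_in_label
-- ===== SOURCE A (Python) =====
-- def split_label(train):
--     aLabel = []
--     count = 0
--     for line in train:
--         for label in aLabel:
--             if label == line[0]:
--                 count = count +1
--         if count == 0: aLabel.append(line[0])
--         count = 0
--     return aLabel
--
-- def dict_label(train):
--     label = dict()
--     for i in split_label(train):
--         label[i] = 0
--     return label
--
-- def count_all_word_in_label(train):
--     label = dict_label(train)
--     for line in train:
--         for i in line:
--             if i == line[0]:
--                 continue
--             label[line[0]] += 1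
--     return label
-- ===== SOURCE B (Python) =====
-- def count_all_word_in_label(train):
--     # One pass: the label is the line's first token; count tokens differing from it.
--     label = {}
--     for line in train:
--         key = line[0]
--         label[key] = label.get(key, 0) + sum(1 for tok in line if tok != key)
--     return label
-- ===== Notes on version B (the rewrite author's own statement) =====
-- stated objective: faster
-- what changed: B replaces A's three passes (quadratic label dedup via split_label, a zero-initialising dict pass, then a counting pass) with a single pass over the lines that accumulates each label's count directly in a dict with get-default.
import Mathlib
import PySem

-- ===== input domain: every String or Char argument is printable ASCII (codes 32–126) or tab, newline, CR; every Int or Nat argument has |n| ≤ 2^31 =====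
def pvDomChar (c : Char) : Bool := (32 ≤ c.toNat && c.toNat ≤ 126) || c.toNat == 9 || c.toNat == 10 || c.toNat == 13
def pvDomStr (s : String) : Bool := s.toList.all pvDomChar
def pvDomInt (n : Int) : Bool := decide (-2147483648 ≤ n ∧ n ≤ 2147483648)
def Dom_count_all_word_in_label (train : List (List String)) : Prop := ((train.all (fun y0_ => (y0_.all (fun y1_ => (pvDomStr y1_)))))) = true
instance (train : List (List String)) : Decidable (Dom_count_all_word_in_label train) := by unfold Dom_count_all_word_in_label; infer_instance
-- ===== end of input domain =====

-- B replaces A's three passes (quadratic dedup of labels, zero-init dict, counting pass)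
-- by one pass accumulating each label's count directly; proved to return the same dict.

-- ===== PORT A =====
-- line[0] is ported as PySem.List.pyGetD line 0 "" — exact under Pre_ (every line nonempty;
-- Python raises IndexError on an empty line).
def pvSplitLabelA (train : List (List String)) : List String :=
  train.foldl (fun aLabel line =>
    let count : Int := aLabel.foldl (fun c label =>
      if label = PySem.List.pyGetD line 0 "" then c + 1 else c) 0
    if count = 0 then aLabel ++ [PySem.List.pyGetD line 0 ""] else aLabel) []

def pvDictLabelA (train : List (List String)) : PySem.Dict String Int :=
  (pvSplitLabelA train).foldl (fun d i => d.insert i 0) PySem.Dict.empty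

-- `label[line[0]] += 1` is ported with getD 0; inside Pre_ the key is always present
-- (dict_label initialises every line's first token), so this is exact.
def count_all_word_in_label (train : List (List String)) : List (String × Int) :=
  (train.foldl (fun d line =>
    line.foldl (fun d2 i =>
      if i = PySem.List.pyGetD line 0 "" then d2
      else d2.insert (PySem.List.pyGetD line 0 "")
             (d2.getD (PySem.List.pyGetD line 0 "") 0 + 1)) d)
    (pvDictLabelA train)).items

-- ===== PORT B =====
def count_all_word_in_label_alt (train : List (List String)) : List (String × Int) :=
  (train.foldl (fun d line =>
    let key := PySem.List.pyGetD line 0 ""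
    d.insert key (d.getD key 0 +
      line.foldl (fun s tok => if tok ≠ key then s + 1 else s) (0 : Int)))
    PySem.Dict.empty).items

-- ===== PRECONDITION & SPEC =====
-- Pre_ excludes trains containing an empty line: there Python's line[0] raises IndexError.
def Pre_count_all_word_in_label (train : List (List String)) : Prop :=
  ∀ line ∈ train, line ≠ []
instance (train : List (List String)) : Decidable (Pre_count_all_word_in_label train) := by
  unfold Pre_count_all_word_in_label; infer_instance

def pvWitness_count_all_word_in_label : List (List String) :=
  [["pos", "good", "fine"], ["neg", "bad"], ["pos", "pos", "ok"]]

def Spec_count_all_word_in_label (train : List (List String)) (out : List (String × Int)) : Prop := out = count_all_word_in_label_alt train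
instance (train : List (List String)) (out : List (String × Int)) : Decidable (Spec_count_all_word_in_label train out) := by unfold Spec_count_all_word_in_label; infer_instance

-- ===== CLAIM (what is proved, stated in full; the proofs are below) =====
def Claim_equal_count_all_word_in_label : Prop := ∀ (train : List (List String)), Dom_count_all_word_in_label train → Pre_count_all_word_in_label train → Spec_count_all_word_in_label train (count_all_word_in_label train)

-- ===== LEMMAS AND PROOFS =====

-- the effective first token of a line
def pvHd (line : List String) : String := PySem.List.pyGetD line 0 ""

-- A's per-line dict update (the inner `for i in line` loop)
def pvAstep (d : PySem.Dict String Int) (line : List String) : PySem.Dict String Int :=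
  line.foldl (fun d2 i =>
    if i = pvHd line then d2
    else d2.insert (pvHd line) (d2.getD (pvHd line) 0 + 1)) d

-- B's count of tokens differing from the key
def pvCnt (key : String) (line : List String) : Int :=
  line.foldl (fun s tok => if tok ≠ key then s + 1 else s) 0

-- B's per-line dict update
def pvBstep (d : PySem.Dict String Int) (line : List String) : PySem.Dict String Int :=
  d.insert (pvHd line) (d.getD (pvHd line) 0 + pvCnt (pvHd line) line)

lemma pvA_eq_fold (train : List (List String)) :
    count_all_word_in_label train = (train.foldl pvAstep (pvDictLabelA train)).items := rfl

lemma pvB_eq_fold (train : List (List String)) :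
    count_all_word_in_label_alt train = (train.foldl pvBstep PySem.Dict.empty).items := rfl

lemma pvCnt_eq (key : String) (line : List String) :
    pvCnt key line = ((line.countP (fun t => t != key) : Nat) : Int) := by
  unfold pvCnt
  rw [PySem.List.foldl_congr_mem line _
      (fun s tok => if (tok != key) = true then s + 1 else s) 0
      (by intro acc x _; simp [bne_iff_ne]),
    PySem.List.foldl_count_if (fun t => t != key) line 0, zero_add]

lemma pv_map_id_of_no_key {l : List (String × Int)} {k : String} {v : Int}
    (h : ∀ p ∈ l, p.1 ≠ k) :
    l.map (fun p => if (p.1 == k) = true then (k, v) else p) = l := by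
  induction l with
  | nil => rfl
  | cons q t ih =>
    simp only [List.map_cons]
    rw [if_neg (by simp [h q (List.mem_cons_self)]), ih (fun p hp => h p (List.mem_cons_of_mem _ hp))]

lemma pv_map_update_self {l : List (String × Int)} {k : String} {v : Int}
    (hn : (l.map Prod.fst).Nodup) (hm : (k, v) ∈ l) :
    l.map (fun p => if (p.1 == k) = true then (k, v) else p) = l := by
  induction l with
  | nil => rfl
  | cons q t ih =>
    simp only [List.map_cons] at hn ⊢
    rcases List.nodup_cons.mp hn with ⟨hq1, hq2⟩
    by_cases hq : q.1 = k
    · have hqv : q = (k, v) := by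
        rcases List.mem_cons.mp hm with h | h
        · exact h.symm
        · exact absurd (by simpa [← hq] using List.mem_map_of_mem (f := Prod.fst) h) hq1
      rw [if_pos (by simp [hq]),
        pv_map_id_of_no_key (fun p hp hpk => hq1 (by rw [hq, ← hpk]; exact List.mem_map_of_mem hp)),
        hqv]
    · have hm' : (k, v) ∈ t := by
        rcases List.mem_cons.mp hm with h | h
        · exact absurd (by rw [← h]) hq
        · exact h
      rw [if_neg (by simp [hq]), ih hq2 hm']

lemma pv_insert_getD_self (d : PySem.Dict String Int) (k : String) (d0 : Int)
    (hc : d.contains k = true) (hn : d.keys.Nodup) :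
    d.insert k (d.getD k d0) = d := by
  apply PySem.Dict.ext
  rw [PySem.Dict.items_insert_of_contains d _ hc]
  have hk : k ∈ d.items.map Prod.fst := by
    simpa [PySem.Dict.keys] using (PySem.Dict.contains_iff_mem_keys d k).mp hc
  obtain ⟨p, hp, hpk⟩ := List.mem_map.mp hk
  have hmem : (k, p.2) ∈ d.items := by
    have : p = (k, p.2) := by rw [← hpk]
    rwa [← this]
  have hv : d.getD k d0 = p.2 := PySem.Dict.getD_of_mem_items d hmem hn d0
  rw [hv]
  exact pv_map_update_self (by simpa [PySem.Dict.keys] using hn) hmem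

lemma pv_inner_eq (line : List String) : ∀ (d : PySem.Dict String Int) (key : String),
    d.contains key = true → d.keys.Nodup →
    line.foldl (fun d2 i =>
      if i = key then d2 else d2.insert key (d2.getD key 0 + 1)) d
    = d.insert key (d.getD key 0 + ((line.countP (fun t => t != key) : Nat) : Int)) := by
  induction line with
  | nil =>
    intro d key hc hn
    simp only [List.foldl_nil, List.countP_nil, Nat.cast_zero, add_zero]
    exact (pv_insert_getD_self d key 0 hc hn).symm
  | cons t line ih =>
    intro d key hc hn
    simp only [List.foldl_cons]
    by_cases ht : t = key
    · rw [if_pos ht, ih d key hc hn]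
      simp [ht]
    · rw [if_neg ht,
        ih (d.insert key (d.getD key 0 + 1)) key (PySem.Dict.contains_insert_self d key _)
          (PySem.Dict.nodup_keys_insert d key _ hn),
        PySem.Dict.insert_insert_self, PySem.Dict.getD_insert_self]
      have : line.countP (fun t => t != key) + 1 = (t :: line).countP (fun t => t != key) := by
        simp [ht]
      rw [← this]
      push_cast
      ring_nf

lemma pv_step_eq (d : PySem.Dict String Int) (line : List String)
    (hc : d.contains (pvHd line) = true) (hn : d.keys.Nodup) :
    pvAstep d line = pvBstep d line := by
  unfold pvAstep pvBstep
  rw [pv_inner_eq line d (pvHd line) hc hn, pvCnt_eq]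

lemma pv_insert_comm (d : PySem.Dict String Int) (k h : String) (v w : Int)
    (hck : d.contains k = true) (hch : d.contains h = false) (hne : h ≠ k) :
    (d.insert h w).insert k v = (d.insert k v).insert h w := by
  apply PySem.Dict.ext
  have h1 : (d.insert h w).contains k = true := by
    rw [PySem.Dict.contains_insert]; simp [hck]
  have h2 : (d.insert k v).contains h = false := by
    rw [PySem.Dict.contains_insert]; simp [hch, hne]
  rw [PySem.Dict.items_insert_of_contains _ _ h1,
    PySem.Dict.items_insert_of_not_contains _ _ hch,
    PySem.Dict.items_insert_of_not_contains _ _ h2,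
    PySem.Dict.items_insert_of_contains _ _ hck,
    List.map_append]
  simp [hne]

lemma pv_fold_insert_comm : ∀ (l : List (List String)) (d : PySem.Dict String Int) (h : String),
    (∀ x ∈ l, pvHd x ≠ h) → (∀ x ∈ l, d.contains (pvHd x) = true) →
    d.contains h = false → d.keys.Nodup →
    l.foldl pvAstep (d.insert h 0) = (l.foldl pvAstep d).insert h 0 := by
  intro l
  induction l with
  | nil => intro d h _ _ _ _; rfl
  | cons x t ih =>
    intro d h hne hcont hch hn
    have hnx : pvHd x ≠ h := hne x List.mem_cons_self
    have hcx : d.contains (pvHd x) = true := hcont x List.mem_cons_self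
    have hstep1 : pvAstep (d.insert h 0) x = pvBstep (d.insert h 0) x :=
      pv_step_eq _ _ (by rw [PySem.Dict.contains_insert]; simp [hcx])
        (PySem.Dict.nodup_keys_insert d h 0 hn)
    have hstep2 : pvAstep d x = pvBstep d x := pv_step_eq d x hcx hn
    simp only [List.foldl_cons, hstep1, hstep2]
    simp only [pvBstep]
    rw [PySem.Dict.getD_insert_of_ne d 0 0 hnx,
      pv_insert_comm d (pvHd x) h _ 0 hcx hch (Ne.symm hnx)]
    exact ih _ h (fun y hy => hne y (List.mem_cons_of_mem _ hy))
      (fun y hy => by rw [PySem.Dict.contains_insert]; simp [hcont y (List.mem_cons_of_mem _ hy)])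
      (by rw [PySem.Dict.contains_insert]; simp [hch, Ne.symm hnx])
      (PySem.Dict.nodup_keys_insert _ _ _ hn)

lemma pv_split_eq (train : List (List String)) :
    pvSplitLabelA train = PySem.Set.ofList (train.map pvHd) := by
  rw [← PySem.Set.update_nil_left, PySem.Set.update_map_eq_foldl_add]
  unfold pvSplitLabelA
  apply PySem.List.foldl_congr_mem
  intro s line _
  show (if (s.foldl (fun c label =>
      if label = PySem.List.pyGetD line 0 "" then c + 1 else c) 0) = 0
    then s ++ [PySem.List.pyGetD line 0 ""] else s) = PySem.Set.add s (pvHd line)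
  have hc : s.foldl (fun c label =>
      if label = PySem.List.pyGetD line 0 "" then c + 1 else c) 0
      = ((s.countP (fun t => t == PySem.List.pyGetD line 0 "") : Nat) : Int) := by
    rw [PySem.List.foldl_congr_mem s _
        (fun c label => if (label == PySem.List.pyGetD line 0 "") = true then c + 1 else c) 0
        (by intro acc x _; simp),
      PySem.List.foldl_count_if _ s 0, zero_add]
  rw [hc]
  by_cases hm : pvHd line ∈ s
  · have hpos : 0 < s.countP (fun t => t == PySem.List.pyGetD line 0 "") :=
      List.countP_pos_iff.mpr ⟨pvHd line, hm, by simp [pvHd]⟩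
    rw [if_neg (by exact_mod_cast hpos.ne'), PySem.Set.add_of_mem hm]
  · have hz : s.countP (fun t => t == PySem.List.pyGetD line 0 "") = 0 :=
      List.countP_eq_zero.mpr (fun a ha hp => hm (by unfold pvHd; exact (eq_of_beq hp) ▸ ha))
    rw [if_pos (by rw [hz]; rfl), PySem.Set.add_of_not_mem hm]
    rfl

lemma pv_dict0_keys (train : List (List String)) :
    (pvDictLabelA train).keys = PySem.Set.ofList (train.map pvHd) := by
  unfold pvDictLabelA
  rw [PySem.Dict.keys_foldl_insert (pvSplitLabelA train) (fun _ _ => 0) PySem.Dict.empty,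
    PySem.Dict.keys_empty, PySem.Set.update_nil_left, pv_split_eq,
    PySem.Set.ofList_eq_self_of_nodup _ (PySem.Set.nodup_ofList _)]

lemma pv_dict0_nodup (train : List (List String)) : (pvDictLabelA train).keys.Nodup := by
  rw [pv_dict0_keys]; exact PySem.Set.nodup_ofList _

lemma pv_Bfold_def (d : PySem.Dict String Int) (l : List (List String)) :
    l.foldl pvBstep d
      = l.foldl (fun d x => d.insert (pvHd x) (d.getD (pvHd x) 0 + pvCnt (pvHd x) x)) d := rfl

lemma pv_B_keys (train : List (List String)) :
    (train.foldl pvBstep PySem.Dict.empty).keys = PySem.Set.ofList (train.map pvHd) := by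
  rw [pv_Bfold_def,
    PySem.Dict.keys_foldl_insert_key train pvHd
      (fun d x => d.getD (pvHd x) 0 + pvCnt (pvHd x) x) PySem.Dict.empty,
    PySem.Dict.keys_empty, PySem.Set.update_nil_left]

lemma pv_B_nodup (train : List (List String)) :
    (train.foldl pvBstep PySem.Dict.empty).keys.Nodup := by
  rw [pv_B_keys]; exact PySem.Set.nodup_ofList _

lemma pv_main_eq (train : List (List String)) :
    train.foldl pvAstep (pvDictLabelA train) = train.foldl pvBstep PySem.Dict.empty := by
  induction train using List.reverseRecOn with
  | nil => rfl
  | append_singleton l a ih =>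
    rw [List.foldl_append, List.foldl_append]
    simp only [List.foldl_cons, List.foldl_nil]
    by_cases hm : pvHd a ∈ l.map pvHd
    · have hsplit : pvSplitLabelA (l ++ [a]) = pvSplitLabelA l := by
        rw [pv_split_eq, pv_split_eq, List.map_append, List.map_cons, List.map_nil,
          PySem.Set.ofList_append_singleton,
          PySem.Set.add_of_mem ((PySem.Set.mem_ofList _ _).mpr hm)]
      have hd0 : pvDictLabelA (l ++ [a]) = pvDictLabelA l := by
        unfold pvDictLabelA; rw [hsplit]
      rw [hd0, ih]
      exact pv_step_eq _ a
        (by rw [PySem.Dict.contains_iff_mem_keys, pv_B_keys, PySem.Set.mem_ofList]; exact hm)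
        (pv_B_nodup l)
    · have hsplit : pvSplitLabelA (l ++ [a]) = pvSplitLabelA l ++ [pvHd a] := by
        rw [pv_split_eq, pv_split_eq, List.map_append, List.map_cons, List.map_nil,
          PySem.Set.ofList_append_singleton,
          PySem.Set.add_of_not_mem (fun hx => hm ((PySem.Set.mem_ofList _ _).mp hx))]
      have hd0 : pvDictLabelA (l ++ [a]) = (pvDictLabelA l).insert (pvHd a) 0 := by
        unfold pvDictLabelA
        rw [hsplit, List.foldl_append]
        simp only [List.foldl_cons, List.foldl_nil]
      have hch : (pvDictLabelA l).contains (pvHd a) = false := by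
        rw [← Bool.not_eq_true, PySem.Dict.contains_iff_mem_keys, pv_dict0_keys,
          PySem.Set.mem_ofList]
        exact hm
      rw [hd0,
        pv_fold_insert_comm l (pvDictLabelA l) (pvHd a)
          (fun x hx hxe => hm (hxe ▸ List.mem_map_of_mem hx))
          (fun x hx => by
            rw [PySem.Dict.contains_iff_mem_keys, pv_dict0_keys, PySem.Set.mem_ofList]
            exact List.mem_map_of_mem hx)
          hch (pv_dict0_nodup l),
        ih,
        pv_step_eq _ a (PySem.Dict.contains_insert_self _ _ _)
          (PySem.Dict.nodup_keys_insert _ _ _ (pv_B_nodup l))]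
      simp only [pvBstep]
      rw [PySem.Dict.insert_insert_self, PySem.Dict.getD_insert_self,
        PySem.Dict.getD_of_not_contains _ 0
          (by rw [← Bool.not_eq_true, PySem.Dict.contains_iff_mem_keys, pv_B_keys,
              PySem.Set.mem_ofList]; exact hm),
        zero_add]

-- ===== VERDICT (by name: the statement is the Claim_ definition above) =====
theorem count_all_word_in_label_spec : Claim_equal_count_all_word_in_label := by
  intro train _ _
  unfold Spec_count_all_word_in_label
  rw [pvA_eq_fold, pvB_eq_fold, pv_main_eq]
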